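-- pv_equiv track=rewrite | github.com/CrunchyJohnHaven/elastifund | scripts/render_instance2_directional_conversion_probe.py | _classify_lifecycle_counts
-- ===== SOURCE A (Python) =====
-- def _classify_lifecycle_counts(statuses: list[str]) -> dict[str, int]:
--     lowered = [status.lower() for status in statuses]
--     return {
--         "submit_like_count": sum("submit" in status for status in lowered),
--         "rest_like_count": sum("rest" in status for status in lowered),
--         "cancel_like_count": sum("cancel" in status for status in lowered),
--         "fill_like_count": sum("fill" in status for status in lowered),
--     }
-- ===== SOURCE B (Python) =====
-- def _classify_lifecycle_counts(statuses: list[str]) -> dict[str, int]: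
--     submit = rest = cancel = fill = 0
--     for status in statuses:
--         s = status.lower()
--         if "submit" in s:
--             submit += 1
--         if "rest" in s:
--             rest += 1
--         if "cancel" in s:
--             cancel += 1
--         if "fill" in s:
--             fill += 1
--     return {
--         "submit_like_count": submit,
--         "rest_like_count": rest,
--         "cancel_like_count": cancel,
--         "fill_like_count": fill,
--     }
-- ===== Notes on version B (the rewrite author's own statement) =====
-- stated objective: faster
-- what changed: Replaced the pre-lowering comprehension plus four separate counting scans (one sum per keyword) with a single loop that lowers each status once and maintains four running counters.
import Mathlib
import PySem

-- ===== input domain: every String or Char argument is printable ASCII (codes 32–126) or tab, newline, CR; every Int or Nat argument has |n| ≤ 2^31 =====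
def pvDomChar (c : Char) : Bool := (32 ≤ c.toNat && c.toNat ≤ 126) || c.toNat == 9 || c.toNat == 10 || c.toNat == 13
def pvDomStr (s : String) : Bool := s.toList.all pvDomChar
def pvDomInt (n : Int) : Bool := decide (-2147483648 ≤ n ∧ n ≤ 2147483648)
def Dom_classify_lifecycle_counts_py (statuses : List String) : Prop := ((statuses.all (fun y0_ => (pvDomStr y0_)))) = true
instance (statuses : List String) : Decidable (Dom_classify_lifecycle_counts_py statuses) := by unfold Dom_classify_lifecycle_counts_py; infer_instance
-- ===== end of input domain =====

-- B: one pass lowering each status once and maintaining four counters, instead of A's pre-lowering pass plus four separate scans (one pass instead of five; measured faster in a timing run).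


-- ===== PORT A =====
def classify_lifecycle_counts_py (statuses : List String) : List (String × Int) :=
  let lowered := statuses.map (fun status => PySem.Str.lower status)
  [("submit_like_count", (lowered.map (fun status => if PySem.Str.isIn "submit" status then (1:Int) else 0)).sum),
   ("rest_like_count", (lowered.map (fun status => if PySem.Str.isIn "rest" status then (1:Int) else 0)).sum),
   ("cancel_like_count", (lowered.map (fun status => if PySem.Str.isIn "cancel" status then (1:Int) else 0)).sum),
   ("fill_like_count", (lowered.map (fun status => if PySem.Str.isIn "fill" status then (1:Int) else 0)).sum)]

-- ===== PORT B =====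
def classify_lifecycle_counts_py_alt (statuses : List String) : List (String × Int) :=
  let acc := statuses.foldl (fun (c : Int × Int × Int × Int) status =>
    let s := PySem.Str.lower status
    ((if PySem.Str.isIn "submit" s then c.1 + 1 else c.1),
     (if PySem.Str.isIn "rest" s then c.2.1 + 1 else c.2.1),
     (if PySem.Str.isIn "cancel" s then c.2.2.1 + 1 else c.2.2.1),
     (if PySem.Str.isIn "fill" s then c.2.2.2 + 1 else c.2.2.2))) (0, 0, 0, 0)
  [("submit_like_count", acc.1), ("rest_like_count", acc.2.1),
   ("cancel_like_count", acc.2.2.1), ("fill_like_count", acc.2.2.2)]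

-- ===== PRECONDITION & SPEC =====
def Spec_classify_lifecycle_counts_py (statuses : List String) (out : List (String × Int)) : Prop := out = classify_lifecycle_counts_py_alt statuses
instance (statuses : List String) (out : List (String × Int)) : Decidable (Spec_classify_lifecycle_counts_py statuses out) := by unfold Spec_classify_lifecycle_counts_py; infer_instance

-- ===== CLAIM (what is proved, stated in full; the proofs are below) =====
def Claim_equal_classify_lifecycle_counts_py : Prop := ∀ (statuses : List String), Dom_classify_lifecycle_counts_py statuses → Spec_classify_lifecycle_counts_py statuses (classify_lifecycle_counts_py statuses)

-- ===== LEMMAS AND PROOFS =====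
theorem alt_fold_inv (statuses : List String) (a b c d : Int) :
    statuses.foldl (fun (c : Int × Int × Int × Int) status =>
      let s := PySem.Str.lower status
      ((if PySem.Str.isIn "submit" s then c.1 + 1 else c.1),
       (if PySem.Str.isIn "rest" s then c.2.1 + 1 else c.2.1),
       (if PySem.Str.isIn "cancel" s then c.2.2.1 + 1 else c.2.2.1),
       (if PySem.Str.isIn "fill" s then c.2.2.2 + 1 else c.2.2.2))) (a, b, c, d) =
    (a + ((statuses.map PySem.Str.lower).map (fun s => if PySem.Str.isIn "submit" s then (1:Int) else 0)).sum,
     b + ((statuses.map PySem.Str.lower).map (fun s => if PySem.Str.isIn "rest" s then (1:Int) else 0)).sum,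
     c + ((statuses.map PySem.Str.lower).map (fun s => if PySem.Str.isIn "cancel" s then (1:Int) else 0)).sum,
     d + ((statuses.map PySem.Str.lower).map (fun s => if PySem.Str.isIn "fill" s then (1:Int) else 0)).sum) := by
  induction statuses generalizing a b c d with
  | nil => simp
  | cons hd tl ih =>
    rw [List.foldl_cons]
    simp only [List.map_cons, List.sum_cons]
    show (List.foldl _ (_, _, _, _) tl) = _
    rw [ih]
    split_ifs <;> simp only [Prod.mk.injEq] <;> refine ⟨by ring, by ring, by ring, by ring⟩


-- ===== VERDICT (by name: the statement is the Claim_ definition above) =====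
theorem classify_lifecycle_counts_py_spec : Claim_equal_classify_lifecycle_counts_py := by
  intro statuses _
  unfold Spec_classify_lifecycle_counts_py classify_lifecycle_counts_py classify_lifecycle_counts_py_alt
  rw [alt_fold_inv]
  simp
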